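-- pv_equiv track=rewrite | github.com/SYED-MHAMIL/py-teach | hacker-rank/prac.py | reverse_chars_keep_digits
-- ===== SOURCE A (Python) =====
-- def reverse_chars_keep_digits(s):
--     char = [c for c in s if not c.isdigit()]
--     result = ""
--     for c in s:
--         if(c.isdigit()):
--             result+=c
--
--         else:
--             result+=char.pop()
--     return result
-- ===== SOURCE B (Python) =====
-- def reverse_chars_keep_digits(s):
--     # Two-ended scan over the live window chars[h:]: fix a digit at either end,
--     # otherwise swap the outermost pair of non-digits; h advances over the front,
--     # pop() consumes the back.
--     chars = list(s)
--     h = 0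
--     front = []
--     back = []
--     while h < len(chars):
--         if chars[h].isdigit():
--             front.append(chars[h])
--             h += 1
--         elif chars[-1].isdigit():
--             back.append(chars.pop())
--         elif h == len(chars) - 1:
--             front.append(chars[h])
--             h += 1
--         else:
--             front.append(chars.pop())
--             back.append(chars[h])
--             h += 1
--     return ''.join(front) + ''.join(reversed(back))
-- ===== Notes on version B (the rewrite author's own statement) =====
-- stated objective: alternative
-- what changed: A filters the non-digits into an auxiliary list and pops its tail while rebuilding the string left-to-right; B never builds that list: it scans the character list from both ends at once, keeping digits in place and swapping the outermost non-digit pair, assembling the result from a front and a back accumulator.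
import Mathlib
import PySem

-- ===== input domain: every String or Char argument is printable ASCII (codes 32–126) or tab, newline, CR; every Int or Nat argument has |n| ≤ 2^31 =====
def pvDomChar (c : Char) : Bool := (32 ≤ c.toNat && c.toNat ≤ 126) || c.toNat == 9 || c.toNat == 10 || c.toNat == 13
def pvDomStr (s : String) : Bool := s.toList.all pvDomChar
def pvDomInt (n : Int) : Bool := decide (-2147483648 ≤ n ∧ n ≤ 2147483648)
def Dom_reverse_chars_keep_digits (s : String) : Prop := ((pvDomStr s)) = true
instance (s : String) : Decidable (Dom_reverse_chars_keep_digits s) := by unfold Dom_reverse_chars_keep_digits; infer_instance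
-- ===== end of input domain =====

-- B is an alternative algorithm of the same cost: it avoids A's auxiliary filtered list,
-- consuming the character list from both ends instead (digits stay, outermost non-digits swap).

-- shared trivial helper: read off and remove the LAST element of a list
-- (models Python's `chars[-1]` / `chars.pop()`; none = empty list)
def pvSplitLast : List Char → Option (List Char × Char)
  | [] => none
  | [x] => some ([], x)
  | x :: y :: xs =>
    match pvSplitLast (y :: xs) with
    | some (m, b) => some (x :: m, b)
    | none => none

-- needed by pvBLoop's termination proof, hence above the ports
theorem pvSplitLast_eq : ∀ (l m : List Char) (b : Char), pvSplitLast l = some (m, b) → l = m ++ [b] := by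
  intro l
  induction l with
  | nil => intro m b h; simp [pvSplitLast] at h
  | cons x xs ih =>
    intro m b h
    cases xs with
    | nil =>
      simp only [pvSplitLast, Option.some.injEq, Prod.mk.injEq] at h
      simp [← h.1, ← h.2]
    | cons y ys =>
      unfold pvSplitLast at h
      cases h' : pvSplitLast (y :: ys) with
      | none => rw [h'] at h; simp at h
      | some p =>
        obtain ⟨m', b'⟩ := p
        rw [h'] at h
        simp only [Option.some.injEq, Prod.mk.injEq] at h
        have hr := ih m' b' h'
        rw [← h.1, ← h.2, hr]
        simp

-- ===== PORT A =====
-- A: char = [c for c in s if not c.isdigit()]; then rebuild, popping char's tail at each non-digit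
def pvAGo : List Char → List Char → List Char → List Char
  | [], _, res => res
  | c :: cs, char, res =>
    if PySem.Chars.isdigit c then pvAGo cs char (res ++ [c])
    else
      match pvSplitLast char with
      | some (m, b) => pvAGo cs m (res ++ [b])  -- result += char.pop()
      | none => res  -- Python: IndexError; unreachable (char holds exactly the remaining non-digits)

def reverse_chars_keep_digits (s : String) : String :=
  String.mk (pvAGo s.toList (s.toList.filter (fun c => !(PySem.Chars.isdigit c))) [])

-- ===== PORT B =====
-- B: the recursion argument is B's live window chars[h:] (h advances over the front, pop()
-- consumes the back); fix a digit at either end, else swap the outermost non-digit pair;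
-- result = ''.join(front) + ''.join(reversed(back))
def pvBLoop : List Char → List Char → List Char → List Char
  | [], front, back => front ++ back.reverse
  | c :: rest, front, back =>
    if PySem.Chars.isdigit c then pvBLoop rest (front ++ [c]) back
    else
      match h : pvSplitLast rest with
      | none => pvBLoop [] (front ++ [c]) back  -- h == len(chars) - 1: lone non-digit stays
      | some (m, b) =>
        if PySem.Chars.isdigit b then pvBLoop (c :: m) front (back ++ [b])
        else pvBLoop m (front ++ [b]) (back ++ [c])
  termination_by chars _ _ => chars.length
  decreasing_by
  · simp
  · simp
  · have := pvSplitLast_eq rest m b h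
    simp [this]
  · have := pvSplitLast_eq rest m b h
    simp [this]

def reverse_chars_keep_digits_alt (s : String) : String :=
  String.mk (pvBLoop s.toList [] [])

-- ===== PRECONDITION & SPEC =====
def Spec_reverse_chars_keep_digits (s : String) (out : String) : Prop := out = reverse_chars_keep_digits_alt s
instance (s : String) (out : String) : Decidable (Spec_reverse_chars_keep_digits s out) := by unfold Spec_reverse_chars_keep_digits; infer_instance

-- ===== CLAIM (what is proved, stated in full; the proofs are below) =====
def Claim_equal_reverse_chars_keep_digits : Prop := ∀ (s : String), Dom_reverse_chars_keep_digits s → Spec_reverse_chars_keep_digits s (reverse_chars_keep_digits s)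

-- ===== LEMMAS AND PROOFS =====

theorem pvSplitLast_none (l : List Char) (h : pvSplitLast l = none) : l = [] := by
  cases l with
  | nil => rfl
  | cons x xs =>
    cases xs with
    | nil => simp [pvSplitLast] at h
    | cons y ys =>
      cases h' : pvSplitLast (y :: ys) with
      | none => exact absurd (pvSplitLast_none _ h') (by simp)
      | some p => simp [pvSplitLast, h'] at h

-- the common target: digits of the first list in place, non-digits taken from the supply
def pvMerge : List Char → List Char → List Char
  | [], _ => []
  | c :: cs, sup =>
    if PySem.Chars.isdigit c then c :: pvMerge cs sup
    else
      match sup with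
      | [] => []
      | r :: rs => r :: pvMerge cs rs

theorem pvAGo_eq : ∀ (cs char res : List Char),
    pvAGo cs char res = res ++ pvMerge cs char.reverse := by
  intro cs
  induction cs with
  | nil => intro char res; simp [pvAGo, pvMerge]
  | cons c cs ih =>
    intro char res
    by_cases hd : PySem.Chars.isdigit c
    · simp [pvAGo, pvMerge, hd, ih]
    · cases h : pvSplitLast char with
      | none =>
          have h0 : char = [] := pvSplitLast_none _ h
          subst h0
          simp [pvAGo, pvMerge, hd, h]
      | some p =>
          obtain ⟨m, b⟩ := p
          have h0 : char = m ++ [b] := pvSplitLast_eq char m b h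
          subst h0
          simp [pvAGo, pvMerge, hd, h, ih]

theorem pvMerge_append_digit : ∀ (xs S : List Char) (b : Char),
    PySem.Chars.isdigit b = true →
    (xs.filter (fun c => !(PySem.Chars.isdigit c))).length = S.length →
    pvMerge (xs ++ [b]) S = pvMerge xs S ++ [b] := by
  intro xs
  induction xs with
  | nil =>
    intro S b hb hlen
    have : S = [] := by simpa using List.eq_nil_of_length_eq_zero (by simpa using hlen.symm)
    simp [this, pvMerge, hb]
  | cons x xs ih =>
    intro S b hb hlen
    by_cases hx : PySem.Chars.isdigit x
    · simp only [List.cons_append, pvMerge, hx, if_true]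
      rw [ih S b hb (by simpa [hx] using hlen)]
    · cases S with
      | nil => simp [hx] at hlen
      | cons r rs =>
          simp only [List.cons_append, pvMerge, hx, if_false, Bool.false_eq_true]
          rw [ih rs b hb (by simpa [List.filter_cons, hx] using hlen)]

theorem pvMerge_append_nondigit : ∀ (xs S : List Char) (b r : Char),
    PySem.Chars.isdigit b = false →
    (xs.filter (fun c => !(PySem.Chars.isdigit c))).length = S.length →
    pvMerge (xs ++ [b]) (S ++ [r]) = pvMerge xs S ++ [r] := by
  intro xs
  induction xs with
  | nil =>
    intro S b r hb hlen
    have : S = [] := by simpa using List.eq_nil_of_length_eq_zero (by simpa using hlen.symm)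
    simp [this, pvMerge, hb]
  | cons x xs ih =>
    intro S b r hb hlen
    by_cases hx : PySem.Chars.isdigit x
    · simp only [List.cons_append, pvMerge, hx, if_true]
      rw [ih S b r hb (by simpa [hx] using hlen)]
    · cases S with
      | nil => simp [hx] at hlen
      | cons q qs =>
          simp only [List.cons_append, pvMerge, hx, if_false, Bool.false_eq_true]
          rw [ih qs b r hb (by simpa [List.filter_cons, hx] using hlen)]

theorem pvBLoop_eq : ∀ (chars front back : List Char),
    pvBLoop chars front back =
      front ++ pvMerge chars ((chars.filter (fun c => !(PySem.Chars.isdigit c))).reverse) ++ back.reverse := by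
  intro chars front back
  induction chars, front, back using pvBLoop.induct with
  | case1 front back => simp [pvBLoop, pvMerge]
  | case2 c rest front back hd ih =>
      rw [pvBLoop]
      simp only [hd, if_true]
      rw [ih]
      simp [pvMerge, hd]
  | case3 c rest front back hd h ih =>
      have hrest : rest = [] := pvSplitLast_none _ h
      subst hrest
      rw [pvBLoop]
      simp only [hd, Bool.false_eq_true, if_false]
      rw [h]
      simp [pvBLoop, pvMerge, hd]
  | case4 c rest front back hd m b h hb ih =>
      have hr : rest = m ++ [b] := pvSplitLast_eq rest m b h
      rw [pvBLoop]
      simp only [hd, Bool.false_eq_true, if_false]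
      rw [h]
      simp only [hb, if_true]
      rw [ih, hr]
      have hfil : ((c :: (m ++ [b])).filter (fun c => !(PySem.Chars.isdigit c)))
          = ((c :: m).filter (fun c => !(PySem.Chars.isdigit c))) := by
        simp [List.filter_append, List.filter_cons, hb]
      rw [hfil]
      rw [show (c :: (m ++ [b])) = (c :: m) ++ [b] by simp]
      rw [pvMerge_append_digit (c :: m) _ b hb (by simp)]
      simp
  | case5 c rest front back hd m b h hb ih =>
      have hr : rest = m ++ [b] := pvSplitLast_eq rest m b h
      rw [pvBLoop]
      simp only [hd, Bool.false_eq_true, if_false]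
      rw [h]
      simp only [hb, Bool.false_eq_true, if_false]
      rw [ih, hr]
      have hb' : PySem.Chars.isdigit b = false := by simpa using hb
      have hfil : ((c :: (m ++ [b])).filter (fun c => !(PySem.Chars.isdigit c)))
          = c :: ((m.filter (fun c => !(PySem.Chars.isdigit c))) ++ [b]) := by
        simp [List.filter_append, hb', hd]
      rw [hfil]
      have key : pvMerge (c :: (m ++ [b])) ((c :: ((m.filter (fun c => !(PySem.Chars.isdigit c))) ++ [b])).reverse)
          = b :: (pvMerge m ((m.filter (fun c => !(PySem.Chars.isdigit c))).reverse) ++ [c]) := by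
        have hrev : (c :: ((m.filter (fun c => !(PySem.Chars.isdigit c))) ++ [b])).reverse
            = b :: ((m.filter (fun c => !(PySem.Chars.isdigit c))).reverse ++ [c]) := by simp
        rw [hrev]
        show pvMerge ((c :: m) ++ [b]) _ = _
        rw [show (b :: ((m.filter (fun c => !(PySem.Chars.isdigit c))).reverse ++ [c]))
            = (b :: (m.filter (fun c => !(PySem.Chars.isdigit c))).reverse) ++ [c] by simp]
        rw [pvMerge_append_nondigit (c :: m) _ b c hb' (by simp [hd])]
        simp [pvMerge, hd]
      rw [key]
      simp

-- ===== VERDICT (by name: the statement is the Claim_ definition above) =====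
theorem reverse_chars_keep_digits_spec : Claim_equal_reverse_chars_keep_digits := by
  intro s _
  unfold Spec_reverse_chars_keep_digits reverse_chars_keep_digits reverse_chars_keep_digits_alt
  rw [pvAGo_eq, pvBLoop_eq]
  simp
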